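-- pv_equiv track=rewrite | github.com/withaarzoo/LeetCode-Solutions | Algorithms/src/2169. Count Operations to Obtain Zero/Code/solution.py | countOperations
-- ===== SOURCE A (Python) =====
-- def countOperations(num1: int, num2: int) -> int:
--     a, b = num1, num2
--     ops = 0
--     while a > 0 and b > 0:
--         if a < b:
--             a, b = b, a            # ensure a >= b
--         ops += a // b               # count batched subtractions
--         a %= b                      # remainder becomes new a
--     return ops
-- ===== SOURCE B (Python) =====
-- def countOperations(num1: int, num2: int) -> int:
--     if num1 <= 0 or num2 <= 0:
--         return 0
--     return num1 // num2 + countOperations(num2, num1 % num2)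
-- ===== Notes on version B (the rewrite author's own statement) =====
-- stated objective: simpler
-- what changed: Replaced the explicit while loop with swap and accumulator by a direct Euclidean recursion that sums quotients, reordering arguments in the recursive call instead of swapping.
import Mathlib
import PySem

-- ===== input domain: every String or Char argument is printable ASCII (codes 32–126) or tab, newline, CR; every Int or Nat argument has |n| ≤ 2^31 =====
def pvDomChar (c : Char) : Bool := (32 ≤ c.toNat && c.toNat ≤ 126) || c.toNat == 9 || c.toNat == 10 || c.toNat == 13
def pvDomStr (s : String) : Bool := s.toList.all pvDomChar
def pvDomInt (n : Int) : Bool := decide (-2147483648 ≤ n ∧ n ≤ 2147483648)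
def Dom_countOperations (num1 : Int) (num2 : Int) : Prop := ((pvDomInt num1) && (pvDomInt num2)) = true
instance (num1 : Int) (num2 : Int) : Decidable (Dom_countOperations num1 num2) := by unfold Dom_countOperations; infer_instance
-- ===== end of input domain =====

-- B replaces A's explicit while loop (with swap and accumulator) by a direct Euclidean
-- recursion summing quotients; objective: simpler. Return values proved equal everywhere.

-- ===== PORT A =====
-- A's while loop: state (a, b, ops); swap branch folded into each arm, body otherwise literal.
def countOpLoop (a b ops : Int) : Int :=
  if h : a > 0 ∧ b > 0 then
    if a < b then
      countOpLoop (PySem.Int.mod b a) a (ops + PySem.Int.floordiv b a)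
    else
      countOpLoop (PySem.Int.mod a b) b (ops + PySem.Int.floordiv a b)
  else ops
termination_by (a + b).toNat
decreasing_by
  · have h1 := PySem.Int.mod_nonneg b h.1
    have h2 := PySem.Int.mod_lt b h.1
    omega
  · have h1 := PySem.Int.mod_nonneg a h.2
    have h2 := PySem.Int.mod_lt a h.2
    omega

def countOperations (num1 : Int) (num2 : Int) : Int := countOpLoop num1 num2 0

-- ===== PORT B =====
def countOperations_alt (num1 : Int) (num2 : Int) : Int :=
  if h : num1 ≤ 0 ∨ num2 ≤ 0 then 0
  else PySem.Int.floordiv num1 num2 + countOperations_alt num2 (PySem.Int.mod num1 num2)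
termination_by num2.toNat
decreasing_by
  have h1 := PySem.Int.mod_nonneg num1 (show (0:Int) < num2 by omega)
  have h2 := PySem.Int.mod_lt num1 (show (0:Int) < num2 by omega)
  omega

-- ===== PRECONDITION & SPEC =====
def Spec_countOperations (num1 : Int) (num2 : Int) (out : Int) : Prop := out = countOperations_alt num1 num2
instance (num1 : Int) (num2 : Int) (out : Int) : Decidable (Spec_countOperations num1 num2 out) := by unfold Spec_countOperations; infer_instance

-- ===== CLAIM (what is proved, stated in full; the proofs are below) =====
def Claim_equal_countOperations : Prop := ∀ (num1 : Int) (num2 : Int), Dom_countOperations num1 num2 → Spec_countOperations num1 num2 (countOperations num1 num2)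

-- ===== LEMMAS AND PROOFS =====

lemma alt_nonpos (a b : Int) (h : a ≤ 0 ∨ b ≤ 0) : countOperations_alt a b = 0 := by
  rw [countOperations_alt]; simp [h]

-- for 0 ≤ r < b the first Euclidean step of B is a pure argument swap
lemma alt_swap (r b : Int) (hr : 0 ≤ r) (hrb : r < b) :
    countOperations_alt r b = countOperations_alt b r := by
  rcases eq_or_lt_of_le hr with h0 | h0
  · rw [alt_nonpos r b (Or.inl (by omega)), alt_nonpos b r (Or.inr (by omega))]
  · rw [countOperations_alt]
    have hguard : ¬ (r ≤ 0 ∨ b ≤ 0) := by omega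
    rw [dif_neg hguard]
    have hb : (0:Int) < b := by omega
    have hdiv : PySem.Int.floordiv r b = 0 := by
      rw [PySem.Int.floordiv_eq_ediv_of_pos hb]
      exact Int.ediv_eq_zero_of_lt hr hrb
    have hmod : PySem.Int.mod r b = r := by
      rw [PySem.Int.mod_eq_emod_of_pos hb]
      exact Int.emod_eq_of_lt hr hrb
    rw [hdiv, hmod]; ring

lemma alt_pos (a b : Int) (ha : 0 < a) (hb : 0 < b) :
    countOperations_alt a b = PySem.Int.floordiv a b + countOperations_alt b (PySem.Int.mod a b) := by
  rw [countOperations_alt, dif_neg (by omega : ¬ (a ≤ 0 ∨ b ≤ 0))]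

lemma loop_eq (a b ops : Int) : countOpLoop a b ops = ops + countOperations_alt a b := by
  induction a, b, ops using countOpLoop.induct with
  | case1 a b ops h hlt ih =>
    rw [countOpLoop, dif_pos h, if_pos hlt, ih,
      alt_swap a b (by omega) hlt, alt_pos b a h.2 h.1,
      alt_swap (PySem.Int.mod b a) a (PySem.Int.mod_nonneg b h.1) (PySem.Int.mod_lt b h.1)]
    ring
  | case2 a b ops h hlt ih =>
    rw [countOpLoop, dif_pos h, if_neg hlt, ih,
      alt_pos a b h.1 h.2,
      alt_swap (PySem.Int.mod a b) b (PySem.Int.mod_nonneg a h.2) (PySem.Int.mod_lt a h.2)]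
    ring
  | case3 a b ops h =>
    rw [countOpLoop, dif_neg h, alt_nonpos a b (by omega)]
    ring

-- ===== VERDICT (by name: the statement is the Claim_ definition above) =====
theorem countOperations_spec : Claim_equal_countOperations := by
  intro num1 num2 _
  unfold Spec_countOperations countOperations
  rw [loop_eq]; ring
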